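-- pv_equiv track=rewrite | github.com/slang5/UnPeuDeTout | EX5.py | Contrarian
-- ===== SOURCE A (Python) =====
-- def Contrarian(RowMatrix):
--     Matrice = RowMatrix
--     countUp = 0
--     countDown = 0
--
--     for i in range(1,len(Matrice)):
--         if Matrice[i-1] != Matrice[i]:
--             countUp += 1
--         else:
--             countDown += 1
--     Profit = countUp - countDown
--     return Profit
-- ===== SOURCE B (Python) =====
-- def Contrarian(RowMatrix):
--     # Count maximal runs of equal elements, then use the run formula:
--     # differing pairs = runs - 1, equal pairs = n - runs, so the answer is
--     # (runs - 1) - (n - runs) = 2*runs - n - 1 (and 0 for an empty list).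
--     n = len(RowMatrix)
--     if n == 0:
--         return 0
--     runs = 0
--     i = 0
--     while i < n:
--         head = RowMatrix[i]
--         i += 1
--         while i < n and RowMatrix[i] == head:
--             i += 1
--         runs += 1
--     return 2 * runs - n - 1
-- ===== Notes on version B (the rewrite author's own statement) =====
-- stated objective: alternative
-- what changed: B counts maximal runs of equal elements with a run-skipping nested loop and returns 2*runs - n - 1 (0 for empty), instead of A's per-pair tally of differing vs equal neighbours; correct because differing pairs = runs - 1 and equal pairs = n - runs.
import Mathlib
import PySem

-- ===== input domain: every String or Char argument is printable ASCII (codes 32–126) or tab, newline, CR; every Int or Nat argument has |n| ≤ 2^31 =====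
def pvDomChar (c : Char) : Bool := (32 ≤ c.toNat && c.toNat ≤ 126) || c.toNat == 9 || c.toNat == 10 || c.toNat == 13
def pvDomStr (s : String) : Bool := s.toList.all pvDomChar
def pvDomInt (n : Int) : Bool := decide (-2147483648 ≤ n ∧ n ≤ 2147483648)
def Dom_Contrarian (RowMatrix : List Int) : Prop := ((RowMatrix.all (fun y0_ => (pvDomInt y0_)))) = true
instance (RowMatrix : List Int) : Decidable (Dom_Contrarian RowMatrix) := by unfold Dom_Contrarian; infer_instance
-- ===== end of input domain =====

-- B counts maximal runs of equal elements by skipping each run, and returns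
-- 2*runs - n - 1 (0 for the empty list) — an alternative decomposition of the same value.

-- ===== PORT A =====
def Contrarian (RowMatrix : List Int) : Int :=
  let Matrice := RowMatrix
  let s := (PySem.List.pyRange 1 (PySem.List.len Matrice) 1).foldl
    (fun (acc : Int × Int) i =>
      if PySem.List.pyGetD Matrice (i - 1) 0 ≠ PySem.List.pyGetD Matrice i 0 then
        (acc.1 + 1, acc.2)
      else
        (acc.1, acc.2 + 1))
    (0, 0)
  s.1 - s.2

-- ===== PORT B =====
-- inner while: advance i while RowMatrix[i] == head
def pvSkipRun (M : List Int) (head : Int) (i : Nat) : Nat :=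
  if h : i < M.length ∧ PySem.List.pyGetD M (i : Int) 0 = head then
    pvSkipRun M head (i + 1)
  else i
termination_by M.length - i
decreasing_by omega

theorem pvSkipRun_ge (M : List Int) (head : Int) (i : Nat) : i ≤ pvSkipRun M head i := by
  rw [pvSkipRun]
  split
  · have := pvSkipRun_ge M head (i + 1); omega
  · omega
termination_by M.length - i
decreasing_by rename_i h; omega

-- outer while: count runs, starting a new run at each position i
def pvOuter (M : List Int) (i : Nat) (runs : Nat) : Nat :=
  if h : i < M.length then
    pvOuter M (pvSkipRun M (PySem.List.pyGetD M (i : Int) 0) (i + 1)) (runs + 1)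
  else runs
termination_by M.length - i
decreasing_by have := pvSkipRun_ge M (PySem.List.pyGetD M (i : Int) 0) (i + 1); omega

def Contrarian_alt (RowMatrix : List Int) : Int :=
  let n : Int := PySem.List.len RowMatrix
  if n = 0 then 0
  else 2 * (pvOuter RowMatrix 0 0 : Int) - n - 1

-- ===== PRECONDITION & SPEC =====
def Spec_Contrarian (RowMatrix : List Int) (out : Int) : Prop := out = Contrarian_alt RowMatrix
instance (RowMatrix : List Int) (out : Int) : Decidable (Spec_Contrarian RowMatrix out) := by unfold Spec_Contrarian; infer_instance

-- ===== CLAIM (what is proved, stated in full; the proofs are below) =====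
def Claim_equal_Contrarian : Prop := ∀ (RowMatrix : List Int), Dom_Contrarian RowMatrix → Spec_Contrarian RowMatrix (Contrarian RowMatrix)

-- ===== LEMMAS AND PROOFS =====

-- number of differing adjacent pairs
def pvDiffs (M : List Int) : Nat := ((M.zip M.tail).filter (fun p => p.1 ≠ p.2)).length

-- runs as a structural recursion over suffixes (proof-side characterisation of the two whiles)
def pvRuns : List Int → Nat
  | [] => 0
  | x :: xs => 1 + pvRuns (xs.dropWhile (· == x))
termination_by l => l.length
decreasing_by simpa using Nat.lt_succ_of_le (List.length_dropWhile_le _ _)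

-- proof helper: the Int index i = k + 1 that A's loop uses, as a function of the range position k
def idx1 (k : Nat) : Int := ((k + 1 : Nat) : Int)

-- range(1, n) as a shifted List.range
lemma pyRange_one_len (n : Nat) :
    PySem.List.pyRange 1 (n : Int) 1 = (List.range (n - 1)).map idx1 := by
  induction n with
  | zero => decide
  | succ m ih =>
    rcases Nat.eq_zero_or_pos m with hm | hm
    · subst hm; decide
    · have h1 : (1 : Int) ≤ (m : Int) := by exact_mod_cast hm
      have hc : ((m + 1 : Nat) : Int) = (m : Int) + 1 := by push_cast; ring
      rw [hc, PySem.List.pyRange_one_succ_right h1, ih,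
        show m + 1 - 1 = (m - 1) + 1 from by omega, List.range_succ, List.map_append]
      congr 1
      simp only [List.map_cons, List.map_nil, idx1]
      congr 1
      omega

-- the indexed adjacent pairs are exactly zip with the tail
lemma pairs_eq (M : List Int) :
    (List.range (M.length - 1)).map
      (fun k => (PySem.List.pyGetD M (idx1 k - 1) 0, PySem.List.pyGetD M (idx1 k) 0))
      = M.zip M.tail := by
  apply List.ext_getElem
  · simp [List.length_zip]
  · intro k hk hk'
    have hkm : k < M.length - 1 := by simpa using hk
    have h1 : k < M.length := by omega
    have h2 : k + 1 < M.length := by omega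
    simp only [List.getElem_map, List.getElem_range, List.getElem_zip]
    have e1 : idx1 k - 1 = ((k : Nat) : Int) := by unfold idx1; push_cast; ring
    rw [e1, PySem.List.pyGetD_natCast]
    show (M.getD k 0, PySem.List.pyGetD M (((k + 1 : Nat) : Int)) 0) = _
    rw [PySem.List.pyGetD_natCast,
      List.getD_eq_getElem _ _ h1, List.getD_eq_getElem _ _ h2]
    simp [List.getElem_tail]

-- A's indexed loop is a fold over the zipped pairs
lemma fold_eq (M : List Int) :
    (PySem.List.pyRange 1 (PySem.List.len M) 1).foldl
      (fun (acc : Int × Int) i =>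
        if PySem.List.pyGetD M (i - 1) 0 ≠ PySem.List.pyGetD M i 0 then
          (acc.1 + 1, acc.2)
        else (acc.1, acc.2 + 1)) (0, 0)
    = (M.zip M.tail).foldl
        (fun (acc : Int × Int) p =>
          if p.1 ≠ p.2 then (acc.1 + 1, acc.2) else (acc.1, acc.2 + 1)) (0, 0) := by
  have hlen : PySem.List.len M = (M.length : Int) := rfl
  rw [hlen, pyRange_one_len, ← pairs_eq M, List.foldl_map, List.foldl_map]

-- value of the pair fold: 2 * (#differing) - #pairs
lemma pairfold (P : List (Int × Int)) :
    (P.foldl (fun (acc : Int × Int) p =>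
        if p.1 ≠ p.2 then (acc.1 + 1, acc.2) else (acc.1, acc.2 + 1)) (0, 0)).1
    - (P.foldl (fun (acc : Int × Int) p =>
        if p.1 ≠ p.2 then (acc.1 + 1, acc.2) else (acc.1, acc.2 + 1)) (0, 0)).2
    = 2 * ((P.filter (fun p => p.1 ≠ p.2)).length : Int) - (P.length : Int) := by
  have split :
      P.foldl (fun (acc : Int × Int) p =>
          if p.1 ≠ p.2 then (acc.1 + 1, acc.2) else (acc.1, acc.2 + 1)) (0, 0)
        = (P.foldl (fun (u : Int) p => if decide (p.1 ≠ p.2) then u + 1 else u) 0,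
           P.foldl (fun (v : Int) p => if !decide (p.1 ≠ p.2) then v + 1 else v) 0) := by
    rw [← PySem.List.foldl_prod_mk]
    congr 1
    funext acc p
    by_cases h : p.1 = p.2 <;> simp [h]
  rw [split, PySem.List.foldl_count_if, PySem.List.foldl_count_if]
  rw [show (List.filter (fun p : Int × Int => decide (p.1 ≠ p.2)) P).length = P.countP (fun p => decide (p.1 ≠ p.2)) from List.countP_eq_length_filter.symm]
  have hlen2 : P.length
      = P.countP (fun p => decide (p.1 ≠ p.2)) + P.countP (fun p => !decide (p.1 ≠ p.2)) := by
    simpa using List.length_eq_countP_add_countP (fun p : Int × Int => decide (p.1 ≠ p.2)) (l := P)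
  omega

-- dropWhile is drop of the takeWhile length
lemma dropWhile_eq_drop (p : Int → Bool) (l : List Int) :
    l.dropWhile p = l.drop (l.takeWhile p).length := by
  induction l with
  | nil => rfl
  | cons x xs ih =>
    by_cases h : p x <;> simp [List.dropWhile, List.takeWhile, h, ih]

-- the inner while skips exactly the leading run after position i
lemma skipRun_eq (M : List Int) (head : Int) (i : Nat) :
    pvSkipRun M head i = i + ((M.drop i).takeWhile (fun y => y == head)).length := by
  rw [pvSkipRun]
  split
  · rename_i h
    obtain ⟨hi, hv⟩ := h
    have hdrop : M.drop i = M[i] :: M.drop (i + 1) := List.drop_eq_getElem_cons hi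
    have hval : M[i] = head := by
      rw [PySem.List.pyGetD_natCast, List.getD_eq_getElem _ _ hi] at hv
      exact hv
    have hb : (M[i] == head) = true := by simpa using hval
    rw [skipRun_eq M head (i + 1), hdrop]
    simp [List.takeWhile, hb]
    omega
  · rename_i h
    rcases Nat.lt_or_ge i M.length with hi | hi
    · have hval : PySem.List.pyGetD M (i : Int) 0 ≠ head := by tauto
      have hdrop : M.drop i = M[i] :: M.drop (i + 1) := List.drop_eq_getElem_cons hi
      have hval' : M[i] ≠ head := by
        rw [PySem.List.pyGetD_natCast, List.getD_eq_getElem _ _ hi] at hval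
        exact hval
      have hb : (M[i] == head) = false := by simpa using hval'
      rw [hdrop]
      simp [List.takeWhile, hb]
    · rw [List.drop_eq_nil_of_le hi]
      simp
termination_by M.length - i
decreasing_by rename_i h; omega

-- the outer while counts pvRuns of the remaining suffix
lemma outer_eq (M : List Int) (i : Nat) (r : Nat) :
    pvOuter M i r = r + pvRuns (M.drop i) := by
  rw [pvOuter]
  split
  · rename_i hi
    have hdrop : M.drop i = M[i] :: M.drop (i + 1) := List.drop_eq_getElem_cons hi
    have hval : PySem.List.pyGetD M (i : Int) 0 = M[i] := by
      rw [PySem.List.pyGetD_natCast, List.getD_eq_getElem _ _ hi]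
    rw [outer_eq M _ (r + 1), skipRun_eq, hval]
    have hdd : M.drop (i + 1 + ((M.drop (i + 1)).takeWhile (fun y => y == M[i])).length)
        = (M.drop (i + 1)).drop ((M.drop (i + 1)).takeWhile (fun y => y == M[i])).length := by
      rw [List.drop_drop]
    rw [hdd, ← dropWhile_eq_drop, hdrop, pvRuns]
    omega
  · rename_i hi
    rw [List.drop_eq_nil_of_le (by omega)]
    simp [pvRuns]
termination_by M.length - i
decreasing_by have := pvSkipRun_ge M (PySem.List.pyGetD M (i : Int) 0) (i + 1); omega

-- runs = differing pairs + 1 on a nonempty list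
lemma runs_eq_diffs (xs : List Int) (x : Int) :
    pvRuns (x :: xs) = pvDiffs (x :: xs) + 1 := by
  induction xs generalizing x with
  | nil => simp [pvRuns, pvDiffs]
  | cons y ys ih =>
    by_cases h : y = x
    · subst h
      have e1 : pvRuns (y :: y :: ys) = pvRuns (y :: ys) := by
        rw [pvRuns, pvRuns]
        simp [List.dropWhile]
      have e2 : pvDiffs (y :: y :: ys) = pvDiffs (y :: ys) := by
        simp [pvDiffs, List.zip]
      rw [e1, e2, ih y]
    · have e1 : pvRuns (x :: y :: ys) = 1 + pvRuns (y :: ys) := by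
        rw [pvRuns]
        have hb : (y == x) = false := by simpa using h
        simp [List.dropWhile, hb]
      have e2 : pvDiffs (x :: y :: ys) = 1 + pvDiffs (y :: ys) := by
        have hne : x ≠ y := fun hxy => h hxy.symm
        simp [pvDiffs, List.zip, hne]
        omega
      rw [e1, e2, ih y]
      omega

lemma contrarian_closed (M : List Int) :
    Contrarian M = 2 * (pvDiffs M : Int) - ((M.zip M.tail).length : Int) := by
  unfold Contrarian
  simp only [fold_eq M]
  exact pairfold (M.zip M.tail)

lemma contrarian_eq (M : List Int) : Contrarian M = Contrarian_alt M := by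
  cases M with
  | nil => decide
  | cons x xs =>
    rw [contrarian_closed]
    unfold Contrarian_alt
    have hn : PySem.List.len (x :: xs) = ((xs.length + 1 : Nat) : Int) := by
      simp [PySem.List.len]
    rw [hn]
    have hne : ((xs.length + 1 : Nat) : Int) ≠ 0 := by positivity
    rw [if_neg hne]
    have houter : pvOuter (x :: xs) 0 0 = pvDiffs (x :: xs) + 1 := by
      rw [outer_eq, List.drop_zero, runs_eq_diffs]
      omega
    have hzlen : ((x :: xs).zip xs).length = xs.length := by
      simp [List.length_zip]
    rw [houter]
    show 2 * (pvDiffs (x :: xs) : Int) - (((x :: xs).zip (x :: xs).tail).length : Int) = _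
    simp only [List.tail_cons, hzlen]
    push_cast
    ring

-- ===== VERDICT (by name: the statement is the Claim_ definition above) =====
theorem Contrarian_spec : Claim_equal_Contrarian := by
  intro M _
  unfold Spec_Contrarian
  exact contrarian_eq M
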